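-- pv_equiv track=rewrite | github.com/Lareb25/z5544614_lectures | project1/zid_project1.py | line_to_dict
-- ===== SOURCE A (Python) =====
-- COLUMNS = ['Volume', 'Date', 'Adj Close', 'Close', 'Open', 'High']
--
-- COLWIDTHS = {
--     'Volume': 14,
--     'Date': 11,
--     'Adj Close': 19,
--     'Close': 10,
--     'Open': 6,
--     'High': 20
-- }
--
-- def line_to_dict(line):
--     """Returns the information contained in a line of a ".dat" file as a
--     dictionary, where each key is a column name and each value is a string
--     with the value for that column.
--
--     This line will be split according to the field width in `COLWIDTHS`
--     of each column in `COLUMNS`.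
--
--     Parameters
--     ----------
--     line : str
--         A line from ".dat" file, without any newline characters
--
--     Returns
--     -------
--     dict
--         A dictionary with format {<col> : <value>} where
--         - Each key (<col>) is a column in `COLUMNS` (as a string)
--         - Each value (<value>) is a string containing the correct value for
--           this column.
--
--     Hints (optional)
--     ----------------
--     - Your solution should include the constants `COLUMNS` and `COLWIDTHS`
--     - For each line in the file, extract the correct value for each column
--       sequentially.
--
--     """
--     # <COMPLETE THIS PART>
--
--     result = {}
--     start_index = 0
--     for col in COLUMNS:
--         width = COLWIDTHS[col]
--         value = line[start_index:start_index + width].strip()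
--         result[col] = value
--         start_index += width
--     return result
-- ===== SOURCE B (Python) =====
-- COLUMNS = ['Volume', 'Date', 'Adj Close', 'Close', 'Open', 'High']
--
-- COLWIDTHS = {
--     'Volume': 14,
--     'Date': 11,
--     'Adj Close': 19,
--     'Close': 10,
--     'Open': 6,
--     'High': 20
-- }
--
-- def line_to_dict(line):
--     # Recursively peel the line: take the first column's width off the front
--     # of the remaining string, then recurse on the rest of the columns with
--     # the rest of the string.  No index arithmetic at all.
--     def peel(cols, rest):
--         if not cols:
--             return {}
--         head, *tail = cols
--         w = COLWIDTHS[head]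
--         d = {head: rest[:w].strip()}
--         d.update(peel(tail, rest[w:]))
--         return d
--     return peel(COLUMNS, line)
-- ===== Notes on version B (the rewrite author's own statement) =====
-- stated objective: alternative
-- what changed: Replaces A's single loop threading a mutable start_index into slices of the whole line with a recursion that structurally consumes the input: each step peels the first column's width off the front of the remaining string (rest[:w]) and recurses on the leftover string (rest[w:]), so no offsets are ever computed.
import Mathlib
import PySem

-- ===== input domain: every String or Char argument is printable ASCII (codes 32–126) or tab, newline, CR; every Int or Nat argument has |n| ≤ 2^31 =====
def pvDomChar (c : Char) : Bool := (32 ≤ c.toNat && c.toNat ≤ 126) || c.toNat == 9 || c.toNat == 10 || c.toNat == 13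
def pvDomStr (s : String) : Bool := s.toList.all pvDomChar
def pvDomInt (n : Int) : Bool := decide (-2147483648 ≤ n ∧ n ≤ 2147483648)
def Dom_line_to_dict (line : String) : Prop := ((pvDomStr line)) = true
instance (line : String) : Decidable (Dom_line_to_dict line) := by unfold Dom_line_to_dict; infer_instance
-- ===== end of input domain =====

-- B replaces A's offset-threading loop by a recursion that peels each column off the FRONT of the
-- remaining string (rest[:w] / rest[w:]) — no index arithmetic (objective: alternative decomposition).

-- module-level constants shared by both versions
def pvCOLUMNS : List String := ["Volume", "Date", "Adj Close", "Close", "Open", "High"]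
def pvCOLWIDTHS : PySem.Dict String Int :=
  PySem.Dict.ofList [("Volume", 14), ("Date", 11), ("Adj Close", 19), ("Close", 10), ("Open", 6), ("High", 20)]

-- ===== PORT A =====
-- result = {}; start_index = 0; for col in COLUMNS: width = COLWIDTHS[col]; value = line[start:start+width].strip(); result[col] = value; start += width
def line_to_dict (line : String) : List (String × String) :=
  let st := pvCOLUMNS.foldl
    (fun (st : PySem.Dict String String × Int) col =>
      let width := PySem.Dict.getD pvCOLWIDTHS col 0
      let value := PySem.Str.strip (PySem.Str.slice line (some st.2) (some (st.2 + width)))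
      (PySem.Dict.insert st.1 col value, st.2 + width))
    (PySem.Dict.empty, 0)
  st.1.items

-- ===== PORT B =====
-- def peel(cols, rest): if not cols: return {}; head,*tail = cols; w = COLWIDTHS[head];
--   d = {head: rest[:w].strip()}; d.update(peel(tail, rest[w:])); return d
-- (the keys of the recursive call are the remaining COLUMNS, all distinct from head, so the
--  fresh singleton dict updated with them is exactly the cons of the items in order)
def pvPeel (cols : List String) (rest : String) : List (String × String) :=
  match cols with
  | [] => []
  | head :: tail =>
    let w := PySem.Dict.getD pvCOLWIDTHS head 0
    (head, PySem.Str.strip (PySem.Str.slice rest none (some w)))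
      :: pvPeel tail (PySem.Str.slice rest (some w) none)

def line_to_dict_alt (line : String) : List (String × String) :=
  pvPeel pvCOLUMNS line

-- ===== PRECONDITION & SPEC =====
def Spec_line_to_dict (line : String) (out : List (String × String)) : Prop := out = line_to_dict_alt line
instance (line : String) (out : List (String × String)) : Decidable (Spec_line_to_dict line out) := by unfold Spec_line_to_dict; infer_instance

-- ===== CLAIM (what is proved, stated in full; the proofs are below) =====
def Claim_equal_line_to_dict : Prop := ∀ (line : String), Dom_line_to_dict line → Spec_line_to_dict line (line_to_dict line)

-- ===== LEMMAS AND PROOFS =====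

-- line[0:b] equals line[:b]
theorem strSlice_zero (s : String) (b? : Option Int) :
    PySem.Str.slice s (some 0) b? = PySem.Str.slice s none b? := by
  simp [PySem.Str.slice, PySem.Chars.slice_eq_listSlice]

-- (line[a:])[:b] equals line[a:a+b]
theorem strSlice_peel (s : String) (a b : Int) (ha : 0 ≤ a) (hb : 0 ≤ b) :
    PySem.Str.slice (PySem.Str.slice s (some a) none) none (some b) =
    PySem.Str.slice s (some a) (some (a + b)) := by
  symm
  simp [PySem.Str.slice, PySem.Chars.slice_eq_listSlice,
        PySem.List.slice_toNat _ ha (by omega : (0:Int) ≤ a + b),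
        PySem.List.slice_from _ ha, PySem.List.slice_to _ hb]
  have h : (a + b).toNat - a.toNat = b.toNat := by omega
  rw [h]

-- (line[a:])[b:] equals line[a+b:]
theorem strSlice_chop (s : String) (a b : Int) (ha : 0 ≤ a) (hb : 0 ≤ b) :
    PySem.Str.slice (PySem.Str.slice s (some a) none) (some b) none =
    PySem.Str.slice s (some (a + b)) none := by
  simp [PySem.Str.slice, PySem.Chars.slice_eq_listSlice,
        PySem.List.slice_from _ ha, PySem.List.slice_from _ hb,
        PySem.List.slice_from _ (by omega : (0:Int) ≤ a + b), List.drop_drop]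
  have h : a.toNat + b.toNat = (a + b).toNat := by omega
  rw [h]

-- ===== VERDICT (by name: the statement is the Claim_ definition above) =====
theorem line_to_dict_spec : Claim_equal_line_to_dict := by
  intro line _
  have hV : PySem.Dict.getD pvCOLWIDTHS "Volume" 0 = 14 := by decide
  have hD : PySem.Dict.getD pvCOLWIDTHS "Date" 0 = 11 := by decide
  have hA : PySem.Dict.getD pvCOLWIDTHS "Adj Close" 0 = 19 := by decide
  have hC : PySem.Dict.getD pvCOLWIDTHS "Close" 0 = 10 := by decide
  have hO : PySem.Dict.getD pvCOLWIDTHS "Open" 0 = 6 := by decide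
  have hH : PySem.Dict.getD pvCOLWIDTHS "High" 0 = 20 := by decide
  unfold Spec_line_to_dict line_to_dict line_to_dict_alt pvCOLUMNS
  simp only [List.foldl, pvPeel, hV, hD, hA, hC, hO, hH]
  norm_num [strSlice_chop, strSlice_peel, strSlice_zero]
  simp [PySem.Dict.items_insert_of_not_contains, PySem.Dict.contains_insert,
        PySem.Dict.empty]
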